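-- pv_equiv track=rewrite | github.com/dinhgia2106/RecommendKeyboard | src/models.py | _align_and_label
-- ===== SOURCE A (Python) =====
-- from typing import List, Tuple, Dict, Set
--
-- def _align_and_label(x_raw: str, y_gold: str) -> List[str]:
--     """
--     Handle misaligned text by simple heuristic labeling.
--
--     Args:
--         x_raw: Input text
--         y_gold: Gold segmentation
--
--     Returns:
--         List of labels (may be approximate)
--     """
--     # Simple fallback: assume each 2-3 characters form a word
--     labels = []
--     i = 0
--     while i < len(x_raw):
--         word_len = min(3, len(x_raw) - i)  # Default word length
--
--         if word_len == 1:
--             labels.append('S')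
--         else:
--             labels.append('B')
--             for _ in range(word_len - 2):
--                 labels.append('I')
--             labels.append('E')
--
--         i += word_len
--
--     return labels[:len(x_raw)]  # Ensure correct length
-- ===== SOURCE B (Python) =====
-- def _align_and_label(x_raw: str, y_gold: str) -> list:
--     q, r = divmod(len(x_raw), 3)
--     return ['B', 'I', 'E'] * q + ([], ['S'], ['B', 'E'])[r]
-- ===== Notes on version B (the rewrite author's own statement) =====
-- stated objective: simpler
-- what changed: Replaces the greedy per-chunk while loop (with inner 'I'-append loop and final truncation) by a closed-form assembly: divmod(n,3) gives the number of 'B','I','E' chunks (list repetition) and a remainder tail ([], ['S'] or ['B','E']).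
import Mathlib
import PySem

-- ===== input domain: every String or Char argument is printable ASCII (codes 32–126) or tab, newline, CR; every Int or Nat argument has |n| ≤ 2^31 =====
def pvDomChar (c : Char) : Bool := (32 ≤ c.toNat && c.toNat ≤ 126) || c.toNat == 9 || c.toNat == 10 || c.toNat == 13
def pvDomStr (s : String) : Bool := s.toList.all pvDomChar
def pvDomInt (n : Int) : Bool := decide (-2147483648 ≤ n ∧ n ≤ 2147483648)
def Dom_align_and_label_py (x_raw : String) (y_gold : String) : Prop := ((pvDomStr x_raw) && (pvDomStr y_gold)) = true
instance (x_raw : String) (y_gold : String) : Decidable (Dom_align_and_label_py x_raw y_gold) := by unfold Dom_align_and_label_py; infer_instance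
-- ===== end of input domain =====

-- B replaces A's greedy chunk-scanning while loop by a closed-form divmod assembly (simpler).

-- ===== PORT A =====
-- the while loop: labels is the accumulator, i the cursor, n = len(x_raw)
def alignLoopA (n i : Nat) (labels : List String) : List String :=
  if _h : i < n then
    let word_len := min 3 (n - i)
    let labels :=
      if word_len = 1 then labels ++ ["S"]
      else ((labels ++ ["B"]) ++ (List.range (word_len - 2)).map (fun _ => "I")) ++ ["E"]
    alignLoopA n (i + word_len) labels
  else labels
termination_by n - i
decreasing_by omega

def align_and_label_py (x_raw : String) (_y_gold : String) : List String :=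
  let n := x_raw.toList.length
  -- labels[:len(x_raw)] with a nonnegative bound = List.take n (exact here)
  (alignLoopA n 0 []).take n

-- ===== PORT B =====
def align_and_label_py_alt (x_raw : String) (_y_gold : String) : List String :=
  let n := x_raw.toList.length
  (List.replicate (n / 3) ["B", "I", "E"]).flatten ++
    (if n % 3 = 0 then [] else if n % 3 = 1 then ["S"] else ["B", "E"])

-- ===== PRECONDITION & SPEC =====
def Spec_align_and_label_py (x_raw : String) (y_gold : String) (out : List String) : Prop := out = align_and_label_py_alt x_raw y_gold
instance (x_raw : String) (y_gold : String) (out : List String) : Decidable (Spec_align_and_label_py x_raw y_gold out) := by unfold Spec_align_and_label_py; infer_instance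

-- ===== CLAIM (what is proved, stated in full; the proofs are below) =====
def Claim_equal_align_and_label_py : Prop := ∀ (x_raw : String) (y_gold : String), Dom_align_and_label_py x_raw y_gold → Spec_align_and_label_py x_raw y_gold (align_and_label_py x_raw y_gold)

-- ===== LEMMAS AND PROOFS =====

-- closed form of the loop's remaining output for m remaining characters
def chunkForm (m : Nat) : List String :=
  (List.replicate (m / 3) ["B", "I", "E"]).flatten ++
    (if m % 3 = 0 then [] else if m % 3 = 1 then ["S"] else ["B", "E"])

theorem chunkForm_step (m : Nat) : chunkForm (m + 3) = ["B", "I", "E"] ++ chunkForm m := by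
  unfold chunkForm
  have h1 : (m + 3) / 3 = m / 3 + 1 := by omega
  have h2 : (m + 3) % 3 = m % 3 := by omega
  simp [h1, h2, List.replicate_succ]

theorem chunkForm_length (m : Nat) : (chunkForm m).length = m := by
  unfold chunkForm
  have h : m % 3 = 0 ∨ m % 3 = 1 ∨ m % 3 = 2 := by omega
  rcases h with h0 | h0 | h0 <;> simp [h0] <;> omega

theorem alignLoopA_eq (m : Nat) : ∀ (n i : Nat) (acc : List String), n - i = m →
    alignLoopA n i acc = acc ++ chunkForm m := by
  induction m using Nat.strong_induction_on with
  | _ m ih =>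
    intro n i acc hm
    rw [alignLoopA]
    by_cases h : i < n
    · simp only [h, dif_pos]
      have hw : min 3 (n - i) = min 3 m := by rw [hm]
      rcases Nat.lt_or_ge m 3 with hm3 | hm3
      · interval_cases m
        · omega
        · have : min 3 (n - i) = 1 := by omega
          simp only [this]
          rw [ih 0 (by omega) n (i + 1) _ (by omega)]
          simp [chunkForm]
        · have : min 3 (n - i) = 2 := by omega
          simp only [this]
          rw [ih 0 (by omega) n (i + 2) _ (by omega)]
          simp [chunkForm]
      · have : min 3 (n - i) = 3 := by omega
        simp only [this]
        rw [ih (m - 3) (by omega) n (i + 3) _ (by omega)]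
        have : m = (m - 3) + 3 := by omega
        rw [this, chunkForm_step]
        simp [List.range_succ]
    · have : m = 0 := by omega
      simp [h, this, chunkForm]

-- ===== VERDICT (by name: the statement is the Claim_ definition above) =====
theorem align_and_label_py_spec : Claim_equal_align_and_label_py := by
  intro x_raw y_gold _
  have key : ∀ n : Nat, (alignLoopA n 0 []).take n = chunkForm n := by
    intro n
    rw [alignLoopA_eq n n 0 [] (by omega), List.nil_append]
    exact List.take_of_length_le (by rw [chunkForm_length])
  exact key x_raw.toList.length
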